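-- pv_equiv track=rewrite | github.com/marianaasoares/exerciciospython | piano_intergalatico.py | achar_frequencia
-- ===== SOURCE A (Python) =====
-- from collections import Counter
--
-- def achar_frequencia(lista_separada):
--     contador_de_freq = Counter(lista_separada)
--     frequencias = []
--     maior_freq = max(contador_de_freq.values())
--     for elemento in contador_de_freq.items():
--         if elemento[1] == maior_freq:
--             frequencias.append(elemento[0])
--     return max(frequencias)
-- ===== SOURCE B (Python) =====
-- from collections import Counter
--
--
-- def achar_frequencia(lista_separada):
--     contador = Counter(lista_separada)
--     return max(contador.items(), key=lambda kv: (kv[1], kv[0]))[0]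
-- ===== Notes on version B (the rewrite author's own statement) =====
-- stated objective: simpler
-- what changed: Replaced A's three stages (max of the counter's values, a loop collecting all tied elements into a list, then max of that list) by one running-maximum pass over the counter's items with the composite key (count, element); no intermediate list is built.
import Mathlib
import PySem

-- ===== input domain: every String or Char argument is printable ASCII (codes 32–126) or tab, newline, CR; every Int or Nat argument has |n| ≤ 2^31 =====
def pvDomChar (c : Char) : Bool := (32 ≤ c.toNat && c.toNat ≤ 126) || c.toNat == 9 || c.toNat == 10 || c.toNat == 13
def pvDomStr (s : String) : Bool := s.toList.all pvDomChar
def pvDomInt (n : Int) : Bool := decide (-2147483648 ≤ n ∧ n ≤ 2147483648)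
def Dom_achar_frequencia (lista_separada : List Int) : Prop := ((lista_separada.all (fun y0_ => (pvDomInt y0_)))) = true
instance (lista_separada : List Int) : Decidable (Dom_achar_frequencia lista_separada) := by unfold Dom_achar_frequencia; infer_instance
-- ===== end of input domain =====

-- B replaces A's three-stage max-frequency / collect-ties / max-of-ties with one running max over the
-- counter's items keyed by (count, element) — simpler, same cost.


-- ===== PORT A =====
def achar_frequencia (lista_separada : List Int) : Int :=
  let contador_de_freq := PySem.Dict.counter lista_separada
  let frequencias : List Int := []
  -- max() over an empty sequence raises ValueError; Pre_ excludes that input, so the '.getD 0' is unreachable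
  let maior_freq : Int := (PySem.List.max? contador_de_freq.values (fun v => v)).getD 0
  let frequencias := contador_de_freq.items.foldl
    (fun acc elemento => if elemento.2 == maior_freq then acc ++ [elemento.1] else acc) frequencias
  (PySem.List.max? frequencias (fun v => v)).getD 0

-- ===== PORT B =====
def achar_frequencia_alt (lista_separada : List Int) : Int :=
  let contador := PySem.Dict.counter lista_separada
  -- max(contador.items(), key=lambda kv: (kv[1], kv[0]))[0]; raises ValueError on the empty list (outside Pre_)
  ((PySem.List.max2? contador.items (fun kv => kv.2) (fun kv => kv.1)).getD (0, 0)).1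

-- ===== PRECONDITION & SPEC =====
-- Pre_ excludes exactly the empty list, on which both A and B raise ValueError (max of an empty sequence).
def Pre_achar_frequencia (lista_separada : List Int) : Prop := lista_separada ≠ []
instance (lista_separada : List Int) : Decidable (Pre_achar_frequencia lista_separada) := by unfold Pre_achar_frequencia; infer_instance
def pvWitness_achar_frequencia : List Int := [1, 2, 2]
def Spec_achar_frequencia (lista_separada : List Int) (out : Int) : Prop := out = achar_frequencia_alt lista_separada
instance (lista_separada : List Int) (out : Int) : Decidable (Spec_achar_frequencia lista_separada out) := by unfold Spec_achar_frequencia; infer_instance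

-- ===== CLAIM (what is proved, stated in full; the proofs are below) =====
def Claim_equal_achar_frequencia : Prop := ∀ (lista_separada : List Int), Dom_achar_frequencia lista_separada → Pre_achar_frequencia lista_separada → Spec_achar_frequencia lista_separada (achar_frequencia lista_separada)

-- ===== LEMMAS AND PROOFS =====

-- the step of B's running maximum (named so the fold invariant can be stated about it)
def pvStep (acc : Option (Int × Int)) (x : Int × Int) : Option (Int × Int) :=
  match acc with
  | none => some x
  | some m => if (decide (m.2 < x.2) || !decide (x.2 < m.2) && decide (m.1 < x.1)) = true then some x else some m

theorem pvMax2_eq_foldl_pvStep (xs : List (Int × Int)) :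
    PySem.List.max2? xs (fun kv => kv.2) (fun kv => kv.1) = xs.foldl pvStep none := by
  unfold PySem.List.max2?
  congr 1
  funext acc x
  cases acc <;> rfl

-- lexicographic "≤" on (key, count) pairs, count first — the order B's running max maintains
def pvLexLe (p m : Int × Int) : Prop := p.2 < m.2 ∨ (p.2 = m.2 ∧ p.1 ≤ m.1)

theorem pvLexLe_refl (p : Int × Int) : pvLexLe p p := by unfold pvLexLe; omega

theorem pvLexLe_trans {p q r : Int × Int} (h1 : pvLexLe p q) (h2 : pvLexLe q r) : pvLexLe p r := by
  unfold pvLexLe at *; omega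

-- invariant of B's fold: starting from 'some m0' it returns a pair of the pool that lex-dominates the pool
theorem pvMax2Fold (t : List (Int × Int)) : ∀ (m0 : Int × Int),
    ∃ m, t.foldl pvStep (some m0) = some m ∧ (m = m0 ∨ m ∈ t) ∧ pvLexLe m0 m ∧ ∀ p ∈ t, pvLexLe p m := by
  induction t with
  | nil => intro m0; exact ⟨m0, rfl, Or.inl rfl, pvLexLe_refl m0, by simp⟩
  | cons x t ih =>
    intro m0
    have hcons : (x :: t).foldl pvStep (some m0)
        = t.foldl pvStep (if (decide (m0.2 < x.2) || !decide (x.2 < m0.2) && decide (m0.1 < x.1)) = true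
                          then some x else some m0) := rfl
    by_cases h : (decide (m0.2 < x.2) || !decide (x.2 < m0.2) && decide (m0.1 < x.1)) = true
    · obtain ⟨m, hm, hmem, hle, hall⟩ := ih x
      refine ⟨m, by rw [hcons, if_pos h]; exact hm, ?_, ?_, ?_⟩
      · rcases hmem with h' | h' <;> simp [h']
      · simp only [Bool.or_eq_true, Bool.and_eq_true, Bool.not_eq_eq_eq_not, Bool.not_true,
          decide_eq_true_eq, decide_eq_false_iff_not] at h
        exact pvLexLe_trans (by unfold pvLexLe; omega) hle
      · intro p hp
        rcases List.mem_cons.mp hp with h' | h'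
        · exact h' ▸ hle
        · exact hall p h'
    · obtain ⟨m, hm, hmem, hle, hall⟩ := ih m0
      refine ⟨m, by rw [hcons, if_neg h]; exact hm, ?_, hle, ?_⟩
      · rcases hmem with h' | h' <;> simp [h']
      · intro p hp
        rcases List.mem_cons.mp hp with h' | h'
        · subst h'
          simp only [Bool.or_eq_true, Bool.and_eq_true, Bool.not_eq_eq_eq_not, Bool.not_true,
            decide_eq_true_eq, decide_eq_false_iff_not] at h
          exact pvLexLe_trans (by unfold pvLexLe; omega) hle
        · exact hall p h'

-- B's max2? on a nonempty items list returns a member that lex-dominates all members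
theorem pvMax2Spec (x : Int × Int) (t : List (Int × Int)) :
    ∃ m, PySem.List.max2? (x :: t) (fun kv => kv.2) (fun kv => kv.1) = some m ∧
      m ∈ x :: t ∧ ∀ p ∈ x :: t, pvLexLe p m := by
  obtain ⟨m, hm, hmem, hle, hall⟩ := pvMax2Fold t x
  refine ⟨m, ?_, ?_, ?_⟩
  · rw [pvMax2_eq_foldl_pvStep]
    exact hm
  · rcases hmem with h | h <;> simp [h]
  · intro p hp
    rcases List.mem_cons.mp hp with h | h
    · exact h ▸ hle
    · exact hall p h

-- core: the max of the keys tied at the max count M equals the first component of B's lex-max pair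
theorem pvCore (x : Int × Int) (t : List (Int × Int)) (M : Int)
    (hMmem : M ∈ (x :: t).map (fun p => p.2))
    (hMmax : ∀ y ∈ (x :: t).map (fun p => p.2), y ≤ M) :
    (PySem.List.max? (((x :: t).filter (fun e => e.2 == M)).map (fun e => e.1)) (fun v => v)).getD 0
      = ((PySem.List.max2? (x :: t) (fun kv => kv.2) (fun kv => kv.1)).getD (0, 0)).1 := by
  obtain ⟨m, hm, hmmem, hmall⟩ := pvMax2Spec x t
  -- m has the max count M
  have hm2 : m.2 = M := by
    have h1 : m.2 ≤ M := hMmax m.2 (List.mem_map.mpr ⟨m, hmmem, rfl⟩)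
    obtain ⟨q, hq, hq2⟩ := List.mem_map.mp hMmem
    have := hmall q hq
    unfold pvLexLe at this; omega
  have hmF : m ∈ (x :: t).filter (fun e => e.2 == M) := List.mem_filter.mpr ⟨hmmem, by simp [hm2]⟩
  obtain ⟨y, ys, hys⟩ := List.exists_cons_of_ne_nil
    (show ((x :: t).filter (fun e => e.2 == M)).map (fun e : Int × Int => e.1) ≠ [] by
      intro h
      rw [List.map_eq_nil_iff] at h
      exact absurd (h ▸ hmF) (List.not_mem_nil))
  have hF := PySem.List.max?_id_cons (x := y) (t := ys)
  rw [hys, hF, hm]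
  simp only [Option.getD_some]
  have hFmem : (ys.foldl max y) ∈ y :: ys := by
    rcases PySem.List.foldl_max_mem ys y with h | h
    · simp [h]
    · simp [h]
  have hFmax : ∀ z ∈ y :: ys, z ≤ ys.foldl max y := by
    intro z hz
    rcases List.mem_cons.mp hz with h | h
    · exact h ▸ (PySem.List.le_foldl_max ys y).1
    · exact (PySem.List.le_foldl_max ys y).2 z h
  have h1 : m.1 ≤ ys.foldl max y := hFmax m.1 (hys ▸ List.mem_map.mpr ⟨m, hmF, rfl⟩)
  have h2 : ys.foldl max y ≤ m.1 := by
    obtain ⟨q, hqF, hq1⟩ := List.mem_map.mp (hys ▸ hFmem)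
    obtain ⟨hqps, hq2⟩ := List.mem_filter.mp hqF
    have := hmall q hqps
    unfold pvLexLe at this
    simp only [beq_iff_eq] at hq2
    omega
  omega

-- ===== VERDICT (by name: the statement is the Claim_ definition above) =====
theorem achar_frequencia_spec : Claim_equal_achar_frequencia := by
  intro l _ hpre
  unfold Spec_achar_frequencia achar_frequencia achar_frequencia_alt
  have hne : (PySem.Dict.counter l).items ≠ [] := by
    rw [PySem.Dict.items_counter, Ne, List.map_eq_nil_iff]
    intro h
    obtain ⟨a, ha⟩ := List.exists_mem_of_ne_nil l hpre
    have hmem : a ∈ PySem.Set.ofList l := by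
      rw [PySem.Set.mem_ofList]
      exact ha
    exact absurd (h ▸ hmem) (List.not_mem_nil)
  obtain ⟨x, t, hxt⟩ := List.exists_cons_of_ne_nil hne
  have hv : (PySem.Dict.counter l).values = (PySem.Dict.counter l).items.map (fun p => p.2) := rfl
  simp only [hv, hxt, List.map_cons, PySem.List.max?_id_cons, Option.getD_some]
  rw [PySem.List.foldl_append_if (p := fun e : Int × Int => e.2 == (t.map (fun p => p.2)).foldl max x.2)
      (f := fun e : Int × Int => e.1)]
  rw [List.nil_append]
  apply pvCore
  · rw [List.map_cons]
    rcases PySem.List.foldl_max_mem (t.map (fun p => p.2)) x.2 with h | h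
    · simp [h]
    · simp [h]
  · intro z hz
    rw [List.map_cons] at hz
    rcases List.mem_cons.mp hz with h | h
    · rw [h]
      exact (PySem.List.le_foldl_max (t.map (fun p => p.2)) x.2).1
    · exact (PySem.List.le_foldl_max (t.map (fun p => p.2)) x.2).2 z h
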